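-- pv_equiv track=rewrite | github.com/Hemant-Jain-Author/Problem-Solving-in-Data-Structures-Algorithms-using-Python | Introduction/Introduction.py | array_index_max_diff
-- ===== SOURCE A (Python) =====
-- def array_index_max_diff(arr):
--     size = len(arr)
--     max_diff = -1
--     for i in range(size):
--         j = size - 1
--         while(j > i):
--             if arr[j] >= arr[i] :
--                 max_diff = max(max_diff, j-i)
--                 break
--             j -= 1
--     return max_diff
-- ===== SOURCE B (Python) =====
-- def array_index_max_diff(arr):
--     n = len(arr)
--     for d in range(n - 1, 0, -1):
--         if any(arr[i + d] >= arr[i] for i in range(n - d)):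
--             return d
--     return -1
-- ===== Notes on version B (the rewrite author's own statement) =====
-- stated objective: alternative
-- what changed: B searches over the gap d from largest to smallest and returns the first gap realized by some pair, instead of A's per-index inner backward scan with a running max accumulator.
import Mathlib
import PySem

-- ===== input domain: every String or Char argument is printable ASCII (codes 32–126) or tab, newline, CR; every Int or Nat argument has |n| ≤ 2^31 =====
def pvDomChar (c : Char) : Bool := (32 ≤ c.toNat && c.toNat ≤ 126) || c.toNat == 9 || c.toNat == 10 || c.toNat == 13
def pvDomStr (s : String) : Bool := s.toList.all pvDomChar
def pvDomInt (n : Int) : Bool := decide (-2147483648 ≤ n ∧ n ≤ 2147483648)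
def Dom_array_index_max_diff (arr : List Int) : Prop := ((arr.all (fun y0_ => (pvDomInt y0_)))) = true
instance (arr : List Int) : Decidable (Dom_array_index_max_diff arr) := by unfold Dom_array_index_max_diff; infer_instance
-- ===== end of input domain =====

-- B re-solves the task by scanning candidate gaps d from largest to smallest and returning the
-- first gap realized by some pair, instead of A's per-index backward inner scan with a running max.

-- ===== PORT A =====
-- A's inner while loop: j scans down from `j` while j > i, breaking at the first arr[j] >= arr[i].
-- The loop only reads arr[j] for i < j ≤ len-1, always in range, so `getD _ 0` is exact there.
def pvInnerA (arr : List Int) (ai : Int) (i : Nat) (md : Int) : Nat → Int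
  | 0 => md
  | j+1 =>
    if i < j+1 then
      (if arr.getD (j+1) 0 ≥ ai then max md (((j:Int)+1) - (i:Int)) else pvInnerA arr ai i md j)
    else md

def array_index_max_diff (arr : List Int) : Int :=
  (List.range arr.length).foldl
    (fun md i => pvInnerA arr (arr.getD i 0) i md (arr.length - 1)) (-1)

-- ===== PORT B =====
-- `any(arr[i + d] >= arr[i] for i in range(n - d))`; indices always in range, so `getD _ 0` is exact.
def pvAnyGap (arr : List Int) (d : Nat) : Bool :=
  (List.range (arr.length - d)).any (fun i => arr.getD (i+d) 0 ≥ arr.getD i 0)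

-- `for d in range(n - 1, 0, -1): if any(...): return d` / `return -1`
def pvGoB (arr : List Int) : Nat → Int
  | 0 => -1
  | d+1 => if pvAnyGap arr (d+1) then ((d:Int)+1) else pvGoB arr d

def array_index_max_diff_alt (arr : List Int) : Int := pvGoB arr (arr.length - 1)

-- ===== PRECONDITION & SPEC =====
def Spec_array_index_max_diff (arr : List Int) (out : Int) : Prop := out = array_index_max_diff_alt arr
instance (arr : List Int) (out : Int) : Decidable (Spec_array_index_max_diff arr out) := by unfold Spec_array_index_max_diff; infer_instance

-- ===== CLAIM (what is proved, stated in full; the proofs are below) =====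
def Claim_equal_array_index_max_diff : Prop := ∀ (arr : List Int), Dom_array_index_max_diff arr → Spec_array_index_max_diff arr (array_index_max_diff arr)

-- ===== LEMMAS AND PROOFS =====

-- a qualifying pair of indices
def pvPair (arr : List Int) (i j : Nat) : Prop :=
  i < j ∧ j < arr.length ∧ arr.getD j 0 ≥ arr.getD i 0

-- some pair realizes gap d
def pvEx (arr : List Int) (d : Nat) : Prop :=
  ∃ i, i + d < arr.length ∧ arr.getD (i+d) 0 ≥ arr.getD i 0

lemma pvInnerA_ge_md (arr : List Int) (ai : Int) (i : Nat) (md : Int) :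
    ∀ j, md ≤ pvInnerA arr ai i md j := by
  intro j
  induction j with
  | zero => simp [pvInnerA]
  | succ j ih =>
    simp only [pvInnerA]
    split_ifs with h1 h2
    · exact le_max_left _ _
    · exact ih
    · exact le_rfl

lemma pvInnerA_ge (arr : List Int) (ai : Int) (i : Nat) (md : Int) :
    ∀ j j', i < j' → j' ≤ j → arr.getD j' 0 ≥ ai →
      ((j':Int) - (i:Int)) ≤ pvInnerA arr ai i md j := by
  intro j
  induction j with
  | zero => intro j' h1 h2 _; omega
  | succ j ih =>
    intro j' h1 h2 h3
    simp only [pvInnerA]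
    split_ifs with hij hq
    · have : (j':Int) ≤ (j:Int) + 1 := by exact_mod_cast h2
      have := le_max_right md (((j:Int)+1) - (i:Int))
      omega
    · -- arr[j+1] < ai, so j' ≠ j+1
      have hne : j' ≠ j+1 := by
        intro he; subst he; exact hq h3
      exact ih j' h1 (by omega) h3
    · omega

lemma pvInnerA_cases (arr : List Int) (ai : Int) (i : Nat) (md : Int) :
    ∀ j, pvInnerA arr ai i md j = md ∨
      ∃ j', i < j' ∧ j' ≤ j ∧ arr.getD j' 0 ≥ ai ∧
        pvInnerA arr ai i md j = (j':Int) - (i:Int) := by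
  intro j
  induction j with
  | zero => left; simp [pvInnerA]
  | succ j ih =>
    simp only [pvInnerA]
    split_ifs with hij hq
    · rcases max_choice md (((j:Int)+1) - (i:Int)) with h | h
      · left; exact h
      · right; exact ⟨j+1, hij, le_rfl, hq, by push_cast [h]; ring⟩
    · rcases ih with h | ⟨j', h1, h2, h3, h4⟩
      · left; exact h
      · right; exact ⟨j', h1, by omega, h3, h4⟩
    · left; rfl

lemma pvFoldA_ge (arr : List Int) (l : List Nat) :
    ∀ md : Int, md ≤ l.foldl (fun md i => pvInnerA arr (arr.getD i 0) i md (arr.length - 1)) md := by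
  induction l with
  | nil => intro md; exact le_rfl
  | cons a l ih =>
    intro md
    simp only [List.foldl_cons]
    exact le_trans (pvInnerA_ge_md arr _ a md _) (ih _)

lemma pvA_ge (arr : List Int) (i j : Nat) (h : pvPair arr i j) :
    ((j:Int) - (i:Int)) ≤ array_index_max_diff arr := by
  obtain ⟨hij, hjn, hge⟩ := h
  have hin : i ∈ List.range arr.length := List.mem_range.mpr (by omega)
  obtain ⟨s, t, hst⟩ := List.append_of_mem hin
  unfold array_index_max_diff
  rw [hst, List.foldl_append, List.foldl_cons]
  refine le_trans ?_ (pvFoldA_ge arr t _)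
  exact pvInnerA_ge arr _ i _ _ j hij (by omega) hge

lemma pvFoldA_cases (arr : List Int) (l : List Nat) (hl : ∀ x ∈ l, x < arr.length) :
    ∀ md : Int,
      l.foldl (fun md i => pvInnerA arr (arr.getD i 0) i md (arr.length - 1)) md = md ∨
      ∃ i j, pvPair arr i j ∧
        l.foldl (fun md i => pvInnerA arr (arr.getD i 0) i md (arr.length - 1)) md
          = (j:Int) - (i:Int) := by
  induction l with
  | nil => intro md; left; rfl
  | cons a l ih =>
    intro md
    have han : a < arr.length := hl a List.mem_cons_self
    simp only [List.foldl_cons]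
    rcases ih (fun x hx => hl x (List.mem_cons_of_mem a hx)) (pvInnerA arr (arr.getD a 0) a md (arr.length - 1)) with h | ⟨i, j, hp, he⟩
    · rw [h]
      rcases pvInnerA_cases arr (arr.getD a 0) a md (arr.length - 1) with h2 | ⟨j', h1, h2, h3, h4⟩
      · left; exact h2
      · right; exact ⟨a, j', ⟨h1, by omega, h3⟩, h4⟩
    · right; exact ⟨i, j, hp, he⟩

lemma pvAnyGap_iff (arr : List Int) (d : Nat) :
    pvAnyGap arr d = true ↔ pvEx arr d := by
  unfold pvAnyGap pvEx
  simp only [List.any_eq_true, List.mem_range, decide_eq_true_eq]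
  constructor
  · rintro ⟨i, hi, h⟩; exact ⟨i, by omega, h⟩
  · rintro ⟨i, hi, h⟩; exact ⟨i, by omega, h⟩

lemma pvGoB_ge (arr : List Int) :
    ∀ d k, 1 ≤ k → k ≤ d → pvEx arr k → (k:Int) ≤ pvGoB arr d := by
  intro d
  induction d with
  | zero => intro k h1 h2 _; omega
  | succ d ih =>
    intro k h1 h2 hex
    simp only [pvGoB]
    split_ifs with h
    · have : (k:Int) ≤ (d:Int) + 1 := by exact_mod_cast h2
      omega
    · have hne : k ≠ d + 1 := by
        intro he; subst he
        exact h ((pvAnyGap_iff arr (d+1)).mpr hex)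
      exact ih k h1 (by omega) hex

lemma pvGoB_cases (arr : List Int) :
    ∀ d, pvGoB arr d = -1 ∨
      ∃ k, 1 ≤ k ∧ k ≤ d ∧ pvEx arr k ∧ pvGoB arr d = (k:Int) := by
  intro d
  induction d with
  | zero => left; rfl
  | succ d ih =>
    simp only [pvGoB]
    split_ifs with h
    · right
      exact ⟨d+1, by omega, le_rfl, (pvAnyGap_iff arr (d+1)).mp h, by push_cast; ring⟩
    · rcases ih with h2 | ⟨k, h1, h2, h3, h4⟩
      · left; exact h2
      · right; exact ⟨k, h1, by omega, h3, h4⟩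

lemma pvEx_of_pair (arr : List Int) (i j : Nat) (h : pvPair arr i j) :
    pvEx arr (j - i) := by
  obtain ⟨hij, hjn, hge⟩ := h
  exact ⟨i, by omega, by rwa [Nat.add_sub_cancel' (le_of_lt hij)]⟩

lemma pvPair_of_ex (arr : List Int) (k : Nat) (h : pvEx arr k) (hk : 1 ≤ k) :
    ∃ i, pvPair arr i (i + k) := by
  obtain ⟨i, hi, hge⟩ := h
  exact ⟨i, by omega, hi, hge⟩

-- ===== VERDICT (by name: the statement is the Claim_ definition above) =====
theorem array_index_max_diff_spec : Claim_equal_array_index_max_diff := by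
  intro arr _
  unfold Spec_array_index_max_diff array_index_max_diff_alt
  have hA := pvFoldA_cases arr (List.range arr.length)
    (fun x hx => List.mem_range.mp hx) (-1)
  have hB := pvGoB_cases arr (arr.length - 1)
  rcases hA with hA | ⟨i, j, hp, hA⟩ <;> rcases hB with hB | ⟨k, hk1, hk2, hkex, hB⟩
  · unfold array_index_max_diff; rw [hA, hB]
  · -- A = -1 but a pair with gap k exists: contradiction with pvA_ge
    exfalso
    obtain ⟨i, hp⟩ := pvPair_of_ex arr k hkex hk1
    have := pvA_ge arr i (i + k) hp
    unfold array_index_max_diff at this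
    rw [hA] at this
    push_cast at this
    omega
  · -- B = -1 but pair (i,j) exists: contradiction with pvGoB_ge
    exfalso
    have hex := pvEx_of_pair arr i j hp
    have hd : j - i ≤ arr.length - 1 := by
      obtain ⟨hij, hjn, _⟩ := hp; omega
    have := pvGoB_ge arr (arr.length - 1) (j - i) (by obtain ⟨hij, _, _⟩ := hp; omega) hd hex
    rw [hB] at this
    obtain ⟨hij, _, _⟩ := hp
    omega
  · -- both found a gap: each bounds the other
    have hex := pvEx_of_pair arr i j hp
    obtain ⟨hij, hjn, _⟩ := hp
    have h1 := pvGoB_ge arr (arr.length - 1) (j - i) (by omega) (by omega) hex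
    obtain ⟨i', hp'⟩ := pvPair_of_ex arr k hkex hk1
    have h2 := pvA_ge arr i' (i' + k) hp'
    unfold array_index_max_diff at h2
    rw [hA] at h2
    rw [hB] at h1
    unfold array_index_max_diff
    rw [hA, hB]
    push_cast at h2
    omega
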